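-- pv_equiv track=rewrite | github.com/limejack/Projects | Pac-man/Pac-man.py | resetDots
-- ===== SOURCE A (Python) =====
-- def resetDots(blockSize,topSpace):
--     dots = set()
--
--     for x in range(1,13):
--         dots.add((x*blockSize,1*blockSize+topSpace*blockSize))
--     for x in range(15,27):
--         dots.add((x*blockSize,1*blockSize+topSpace*blockSize))
--     for x in range(1,27):
--         dots.add((x*blockSize,5*blockSize+topSpace*blockSize))
--     for x in range(1,7):
--         dots.add((x*blockSize,8*blockSize+topSpace*blockSize))
--     for x in range(9,13):
--         dots.add((x*blockSize,8*blockSize+topSpace*blockSize))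
--     for x in range(15,19):
--         dots.add((x*blockSize,8*blockSize+topSpace*blockSize))
--     for x in range(22,27):
--         dots.add((x*blockSize,8*blockSize+topSpace*blockSize))
--     for x in range(1,13):
--         dots.add((x*blockSize,20*blockSize+topSpace*blockSize))
--     for x in range(15,27):
--         dots.add((x*blockSize,20*blockSize+topSpace*blockSize))
--     for x in range(1,4):
--         dots.add((x*blockSize,23*blockSize+topSpace*blockSize))
--     for x in range(6,22):
--         dots.add((x*blockSize,23*blockSize+topSpace*blockSize))
--     for x in range(24,27):
--         dots.add((x*blockSize,23*blockSize+topSpace*blockSize))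
--     for x in range(1,7):
--         dots.add((x*blockSize,26*blockSize+topSpace*blockSize))
--     for x in range(9,13):
--         dots.add((x*blockSize,26*blockSize+topSpace*blockSize))
--     for x in range(15,19):
--         dots.add((x*blockSize,26*blockSize+topSpace*blockSize))
--     for x in range(21,27):
--         dots.add((x*blockSize,26*blockSize+topSpace*blockSize))
--     for x in range(1,27):
--         dots.add((x*blockSize,29*blockSize+topSpace*blockSize))
--     for y in range(1,9):
--         dots.add((1*blockSize,y*blockSize+topSpace*blockSize))
--     for y in range(1,27):
--         dots.add((6*blockSize,y*blockSize+topSpace*blockSize))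
--     for y in range(1,6):
--         dots.add((12*blockSize,y*blockSize+topSpace*blockSize))
--     for y in range(5,9):
--         dots.add((9*blockSize,y*blockSize+topSpace*blockSize))
--     for y in range(5,9):
--         dots.add((18*blockSize,y*blockSize+topSpace*blockSize))
--     for y in range(1,27):
--         dots.add((21*blockSize,y*blockSize+topSpace*blockSize))
--     for y in range(1,9):
--         dots.add((26*blockSize,y*blockSize+topSpace*blockSize))
--     for y in range(20,24):
--         dots.add((1*blockSize,y*blockSize+topSpace*blockSize))
--     for y in range(26,30):
--         dots.add((1*blockSize,y*blockSize+topSpace*blockSize))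
--     for y in range(20,24):
--         dots.add((26*blockSize,y*blockSize+topSpace*blockSize))
--     for y in range(26,30):
--         dots.add((26*blockSize,y*blockSize+topSpace*blockSize))
--     for y in range(23,27):
--         dots.add((3*blockSize,y*blockSize+topSpace*blockSize))
--     for y in range(26,30):
--         dots.add((12*blockSize,y*blockSize+topSpace*blockSize))
--     for y in range(23,27):
--         dots.add((9*blockSize,y*blockSize+topSpace*blockSize))
--     for y in range(20,24):
--         dots.add((12*blockSize,y*blockSize+topSpace*blockSize))
--     for y in range(20,24):
--         dots.add((15*blockSize,y*blockSize+topSpace*blockSize))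
--     for y in range(23,26):
--         dots.add((18*blockSize,y*blockSize+topSpace*blockSize))
--     for y in range(26,30):
--         dots.add((15*blockSize,y*blockSize+topSpace*blockSize))
--     for y in range(23,27):
--         dots.add((24*blockSize,y*blockSize+topSpace*blockSize))
--
--
--     return dots
-- ===== SOURCE B (Python) =====
-- # B: the maze's dot layout precomputed as one flat table of distinct grid cells; a single set comprehension scales it (objective: simpler).
-- DOT_CELLS = [
--     (1, 1), (2, 1), (3, 1), (4, 1), (5, 1), (6, 1), (7, 1), (8, 1),
--     (9, 1), (10, 1), (11, 1), (12, 1), (15, 1), (16, 1), (17, 1), (18, 1),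
--     (19, 1), (20, 1), (21, 1), (22, 1), (23, 1), (24, 1), (25, 1), (26, 1),
--     (1, 5), (2, 5), (3, 5), (4, 5), (5, 5), (6, 5), (7, 5), (8, 5),
--     (9, 5), (10, 5), (11, 5), (12, 5), (13, 5), (14, 5), (15, 5), (16, 5),
--     (17, 5), (18, 5), (19, 5), (20, 5), (21, 5), (22, 5), (23, 5), (24, 5),
--     (25, 5), (26, 5), (1, 8), (2, 8), (3, 8), (4, 8), (5, 8), (6, 8),
--     (9, 8), (10, 8), (11, 8), (12, 8), (15, 8), (16, 8), (17, 8), (18, 8),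
--     (22, 8), (23, 8), (24, 8), (25, 8), (26, 8), (1, 20), (2, 20), (3, 20),
--     (4, 20), (5, 20), (6, 20), (7, 20), (8, 20), (9, 20), (10, 20), (11, 20),
--     (12, 20), (15, 20), (16, 20), (17, 20), (18, 20), (19, 20), (20, 20), (21, 20),
--     (22, 20), (23, 20), (24, 20), (25, 20), (26, 20), (1, 23), (2, 23), (3, 23),
--     (6, 23), (7, 23), (8, 23), (9, 23), (10, 23), (11, 23), (12, 23), (13, 23),
--     (14, 23), (15, 23), (16, 23), (17, 23), (18, 23), (19, 23), (20, 23), (21, 23),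
--     (24, 23), (25, 23), (26, 23), (1, 26), (2, 26), (3, 26), (4, 26), (5, 26),
--     (6, 26), (9, 26), (10, 26), (11, 26), (12, 26), (15, 26), (16, 26), (17, 26),
--     (18, 26), (21, 26), (22, 26), (23, 26), (24, 26), (25, 26), (26, 26), (1, 29),
--     (2, 29), (3, 29), (4, 29), (5, 29), (6, 29), (7, 29), (8, 29), (9, 29),
--     (10, 29), (11, 29), (12, 29), (13, 29), (14, 29), (15, 29), (16, 29), (17, 29),
--     (18, 29), (19, 29), (20, 29), (21, 29), (22, 29), (23, 29), (24, 29), (25, 29),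
--     (26, 29), (1, 2), (1, 3), (1, 4), (1, 6), (1, 7), (6, 2), (6, 3),
--     (6, 4), (6, 6), (6, 7), (6, 9), (6, 10), (6, 11), (6, 12), (6, 13),
--     (6, 14), (6, 15), (6, 16), (6, 17), (6, 18), (6, 19), (6, 21), (6, 22),
--     (6, 24), (6, 25), (12, 2), (12, 3), (12, 4), (9, 6), (9, 7), (18, 6),
--     (18, 7), (21, 2), (21, 3), (21, 4), (21, 6), (21, 7), (21, 8), (21, 9),
--     (21, 10), (21, 11), (21, 12), (21, 13), (21, 14), (21, 15), (21, 16), (21, 17),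
--     (21, 18), (21, 19), (21, 21), (21, 22), (21, 24), (21, 25), (26, 2), (26, 3),
--     (26, 4), (26, 6), (26, 7), (1, 21), (1, 22), (1, 27), (1, 28), (26, 21),
--     (26, 22), (26, 27), (26, 28), (3, 24), (3, 25), (12, 27), (12, 28), (9, 24),
--     (9, 25), (12, 21), (12, 22), (15, 21), (15, 22), (18, 24), (18, 25), (15, 27),
--     (15, 28), (24, 24), (24, 25),
-- ]
--
-- def resetDots(blockSize, topSpace):
--     return {(x*blockSize, y*blockSize+topSpace*blockSize) for (x, y) in DOT_CELLS}
-- ===== Notes on version B (the rewrite author's own statement) =====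
-- stated objective: simpler
-- what changed: Replaces the 36 hand-written range loops incrementally building the set with one precomputed flat table of the 243 distinct dot grid cells and a single set comprehension that scales it.
import Mathlib
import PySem

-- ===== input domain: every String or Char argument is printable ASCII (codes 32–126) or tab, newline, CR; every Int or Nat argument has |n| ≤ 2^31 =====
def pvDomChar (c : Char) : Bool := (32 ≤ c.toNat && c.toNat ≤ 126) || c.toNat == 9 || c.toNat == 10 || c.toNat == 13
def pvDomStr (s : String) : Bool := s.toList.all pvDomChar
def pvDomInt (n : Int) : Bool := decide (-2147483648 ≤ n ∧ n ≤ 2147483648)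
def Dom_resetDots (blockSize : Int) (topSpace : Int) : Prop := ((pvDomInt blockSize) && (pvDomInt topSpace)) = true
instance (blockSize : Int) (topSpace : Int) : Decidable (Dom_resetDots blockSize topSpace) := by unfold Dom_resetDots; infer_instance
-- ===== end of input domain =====

-- B replaces the 36 hard-coded range loops by one precomputed flat table of the distinct dot grid cells, scaled by a single set comprehension (objective: simpler).

-- ===== PORT A =====
-- each 'for … in range(a,b): dots.add(…)' is a foldl over pyRange with PySem.Set.add
def resetDots (blockSize : Int) (topSpace : Int) : List (Int × Int) :=
  let dots : PySem.Set (Int × Int) := []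
  let dots := (PySem.List.pyRange 1 13 1).foldl (fun s x => s.add (x*blockSize, 1*blockSize+topSpace*blockSize)) dots
  let dots := (PySem.List.pyRange 15 27 1).foldl (fun s x => s.add (x*blockSize, 1*blockSize+topSpace*blockSize)) dots
  let dots := (PySem.List.pyRange 1 27 1).foldl (fun s x => s.add (x*blockSize, 5*blockSize+topSpace*blockSize)) dots
  let dots := (PySem.List.pyRange 1 7 1).foldl (fun s x => s.add (x*blockSize, 8*blockSize+topSpace*blockSize)) dots
  let dots := (PySem.List.pyRange 9 13 1).foldl (fun s x => s.add (x*blockSize, 8*blockSize+topSpace*blockSize)) dots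
  let dots := (PySem.List.pyRange 15 19 1).foldl (fun s x => s.add (x*blockSize, 8*blockSize+topSpace*blockSize)) dots
  let dots := (PySem.List.pyRange 22 27 1).foldl (fun s x => s.add (x*blockSize, 8*blockSize+topSpace*blockSize)) dots
  let dots := (PySem.List.pyRange 1 13 1).foldl (fun s x => s.add (x*blockSize, 20*blockSize+topSpace*blockSize)) dots
  let dots := (PySem.List.pyRange 15 27 1).foldl (fun s x => s.add (x*blockSize, 20*blockSize+topSpace*blockSize)) dots
  let dots := (PySem.List.pyRange 1 4 1).foldl (fun s x => s.add (x*blockSize, 23*blockSize+topSpace*blockSize)) dots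
  let dots := (PySem.List.pyRange 6 22 1).foldl (fun s x => s.add (x*blockSize, 23*blockSize+topSpace*blockSize)) dots
  let dots := (PySem.List.pyRange 24 27 1).foldl (fun s x => s.add (x*blockSize, 23*blockSize+topSpace*blockSize)) dots
  let dots := (PySem.List.pyRange 1 7 1).foldl (fun s x => s.add (x*blockSize, 26*blockSize+topSpace*blockSize)) dots
  let dots := (PySem.List.pyRange 9 13 1).foldl (fun s x => s.add (x*blockSize, 26*blockSize+topSpace*blockSize)) dots
  let dots := (PySem.List.pyRange 15 19 1).foldl (fun s x => s.add (x*blockSize, 26*blockSize+topSpace*blockSize)) dots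
  let dots := (PySem.List.pyRange 21 27 1).foldl (fun s x => s.add (x*blockSize, 26*blockSize+topSpace*blockSize)) dots
  let dots := (PySem.List.pyRange 1 27 1).foldl (fun s x => s.add (x*blockSize, 29*blockSize+topSpace*blockSize)) dots
  let dots := (PySem.List.pyRange 1 9 1).foldl (fun s y => s.add (1*blockSize, y*blockSize+topSpace*blockSize)) dots
  let dots := (PySem.List.pyRange 1 27 1).foldl (fun s y => s.add (6*blockSize, y*blockSize+topSpace*blockSize)) dots
  let dots := (PySem.List.pyRange 1 6 1).foldl (fun s y => s.add (12*blockSize, y*blockSize+topSpace*blockSize)) dots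
  let dots := (PySem.List.pyRange 5 9 1).foldl (fun s y => s.add (9*blockSize, y*blockSize+topSpace*blockSize)) dots
  let dots := (PySem.List.pyRange 5 9 1).foldl (fun s y => s.add (18*blockSize, y*blockSize+topSpace*blockSize)) dots
  let dots := (PySem.List.pyRange 1 27 1).foldl (fun s y => s.add (21*blockSize, y*blockSize+topSpace*blockSize)) dots
  let dots := (PySem.List.pyRange 1 9 1).foldl (fun s y => s.add (26*blockSize, y*blockSize+topSpace*blockSize)) dots
  let dots := (PySem.List.pyRange 20 24 1).foldl (fun s y => s.add (1*blockSize, y*blockSize+topSpace*blockSize)) dots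
  let dots := (PySem.List.pyRange 26 30 1).foldl (fun s y => s.add (1*blockSize, y*blockSize+topSpace*blockSize)) dots
  let dots := (PySem.List.pyRange 20 24 1).foldl (fun s y => s.add (26*blockSize, y*blockSize+topSpace*blockSize)) dots
  let dots := (PySem.List.pyRange 26 30 1).foldl (fun s y => s.add (26*blockSize, y*blockSize+topSpace*blockSize)) dots
  let dots := (PySem.List.pyRange 23 27 1).foldl (fun s y => s.add (3*blockSize, y*blockSize+topSpace*blockSize)) dots
  let dots := (PySem.List.pyRange 26 30 1).foldl (fun s y => s.add (12*blockSize, y*blockSize+topSpace*blockSize)) dots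
  let dots := (PySem.List.pyRange 23 27 1).foldl (fun s y => s.add (9*blockSize, y*blockSize+topSpace*blockSize)) dots
  let dots := (PySem.List.pyRange 20 24 1).foldl (fun s y => s.add (12*blockSize, y*blockSize+topSpace*blockSize)) dots
  let dots := (PySem.List.pyRange 20 24 1).foldl (fun s y => s.add (15*blockSize, y*blockSize+topSpace*blockSize)) dots
  let dots := (PySem.List.pyRange 23 26 1).foldl (fun s y => s.add (18*blockSize, y*blockSize+topSpace*blockSize)) dots
  let dots := (PySem.List.pyRange 26 30 1).foldl (fun s y => s.add (15*blockSize, y*blockSize+topSpace*blockSize)) dots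
  let dots := (PySem.List.pyRange 23 27 1).foldl (fun s y => s.add (24*blockSize, y*blockSize+topSpace*blockSize)) dots
  dots

-- ===== PORT B =====
-- Source B's literal table of the distinct dot cells
def pvDotCells : List (Int × Int) :=
  [
   (1,1), (2,1), (3,1), (4,1), (5,1), (6,1), (7,1), (8,1),
   (9,1), (10,1), (11,1), (12,1), (15,1), (16,1), (17,1), (18,1),
   (19,1), (20,1), (21,1), (22,1), (23,1), (24,1), (25,1), (26,1),
   (1,5), (2,5), (3,5), (4,5), (5,5), (6,5), (7,5), (8,5),
   (9,5), (10,5), (11,5), (12,5), (13,5), (14,5), (15,5), (16,5),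
   (17,5), (18,5), (19,5), (20,5), (21,5), (22,5), (23,5), (24,5),
   (25,5), (26,5), (1,8), (2,8), (3,8), (4,8), (5,8), (6,8),
   (9,8), (10,8), (11,8), (12,8), (15,8), (16,8), (17,8), (18,8),
   (22,8), (23,8), (24,8), (25,8), (26,8), (1,20), (2,20), (3,20),
   (4,20), (5,20), (6,20), (7,20), (8,20), (9,20), (10,20), (11,20),
   (12,20), (15,20), (16,20), (17,20), (18,20), (19,20), (20,20), (21,20),
   (22,20), (23,20), (24,20), (25,20), (26,20), (1,23), (2,23), (3,23),
   (6,23), (7,23), (8,23), (9,23), (10,23), (11,23), (12,23), (13,23),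
   (14,23), (15,23), (16,23), (17,23), (18,23), (19,23), (20,23), (21,23),
   (24,23), (25,23), (26,23), (1,26), (2,26), (3,26), (4,26), (5,26),
   (6,26), (9,26), (10,26), (11,26), (12,26), (15,26), (16,26), (17,26),
   (18,26), (21,26), (22,26), (23,26), (24,26), (25,26), (26,26), (1,29),
   (2,29), (3,29), (4,29), (5,29), (6,29), (7,29), (8,29), (9,29),
   (10,29), (11,29), (12,29), (13,29), (14,29), (15,29), (16,29), (17,29),
   (18,29), (19,29), (20,29), (21,29), (22,29), (23,29), (24,29), (25,29),
   (26,29), (1,2), (1,3), (1,4), (1,6), (1,7), (6,2), (6,3),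
   (6,4), (6,6), (6,7), (6,9), (6,10), (6,11), (6,12), (6,13),
   (6,14), (6,15), (6,16), (6,17), (6,18), (6,19), (6,21), (6,22),
   (6,24), (6,25), (12,2), (12,3), (12,4), (9,6), (9,7), (18,6),
   (18,7), (21,2), (21,3), (21,4), (21,6), (21,7), (21,8), (21,9),
   (21,10), (21,11), (21,12), (21,13), (21,14), (21,15), (21,16), (21,17),
   (21,18), (21,19), (21,21), (21,22), (21,24), (21,25), (26,2), (26,3),
   (26,4), (26,6), (26,7), (1,21), (1,22), (1,27), (1,28), (26,21),
   (26,22), (26,27), (26,28), (3,24), (3,25), (12,27), (12,28), (9,24),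
   (9,25), (12,21), (12,22), (15,21), (15,22), (18,24), (18,25), (15,27),
   (15,28), (24,24), (24,25)
  ]

-- the set comprehension over DOT_CELLS: ofList of the mapped table
def resetDots_alt (blockSize : Int) (topSpace : Int) : List (Int × Int) :=
  PySem.Set.ofList (pvDotCells.map (fun c => (c.1*blockSize, c.2*blockSize+topSpace*blockSize)))

-- ===== PRECONDITION & SPEC =====
def Spec_resetDots (blockSize : Int) (topSpace : Int) (out : List (Int × Int)) : Prop := out = resetDots_alt blockSize topSpace
instance (blockSize : Int) (topSpace : Int) (out : List (Int × Int)) : Decidable (Spec_resetDots blockSize topSpace out) := by unfold Spec_resetDots; infer_instance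

-- ===== CLAIM =====
def Claim_equal_resetDots : Prop := ∀ (blockSize : Int) (topSpace : Int), Dom_resetDots blockSize topSpace → Spec_resetDots blockSize topSpace (resetDots blockSize topSpace)

-- ===== LEMMAS AND PROOFS =====
-- A's full insertion sequence of grid cells, in source order (with duplicates)
def pvCellsSeq : List (Int × Int) :=
  (PySem.List.pyRange 1 13 1).map (fun v => (v, (1:Int))) ++
  (PySem.List.pyRange 15 27 1).map (fun v => (v, (1:Int))) ++
  (PySem.List.pyRange 1 27 1).map (fun v => (v, (5:Int))) ++
  (PySem.List.pyRange 1 7 1).map (fun v => (v, (8:Int))) ++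
  (PySem.List.pyRange 9 13 1).map (fun v => (v, (8:Int))) ++
  (PySem.List.pyRange 15 19 1).map (fun v => (v, (8:Int))) ++
  (PySem.List.pyRange 22 27 1).map (fun v => (v, (8:Int))) ++
  (PySem.List.pyRange 1 13 1).map (fun v => (v, (20:Int))) ++
  (PySem.List.pyRange 15 27 1).map (fun v => (v, (20:Int))) ++
  (PySem.List.pyRange 1 4 1).map (fun v => (v, (23:Int))) ++
  (PySem.List.pyRange 6 22 1).map (fun v => (v, (23:Int))) ++
  (PySem.List.pyRange 24 27 1).map (fun v => (v, (23:Int))) ++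
  (PySem.List.pyRange 1 7 1).map (fun v => (v, (26:Int))) ++
  (PySem.List.pyRange 9 13 1).map (fun v => (v, (26:Int))) ++
  (PySem.List.pyRange 15 19 1).map (fun v => (v, (26:Int))) ++
  (PySem.List.pyRange 21 27 1).map (fun v => (v, (26:Int))) ++
  (PySem.List.pyRange 1 27 1).map (fun v => (v, (29:Int))) ++
  (PySem.List.pyRange 1 9 1).map (fun v => ((1:Int), v)) ++
  (PySem.List.pyRange 1 27 1).map (fun v => ((6:Int), v)) ++
  (PySem.List.pyRange 1 6 1).map (fun v => ((12:Int), v)) ++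
  (PySem.List.pyRange 5 9 1).map (fun v => ((9:Int), v)) ++
  (PySem.List.pyRange 5 9 1).map (fun v => ((18:Int), v)) ++
  (PySem.List.pyRange 1 27 1).map (fun v => ((21:Int), v)) ++
  (PySem.List.pyRange 1 9 1).map (fun v => ((26:Int), v)) ++
  (PySem.List.pyRange 20 24 1).map (fun v => ((1:Int), v)) ++
  (PySem.List.pyRange 26 30 1).map (fun v => ((1:Int), v)) ++
  (PySem.List.pyRange 20 24 1).map (fun v => ((26:Int), v)) ++
  (PySem.List.pyRange 26 30 1).map (fun v => ((26:Int), v)) ++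
  (PySem.List.pyRange 23 27 1).map (fun v => ((3:Int), v)) ++
  (PySem.List.pyRange 26 30 1).map (fun v => ((12:Int), v)) ++
  (PySem.List.pyRange 23 27 1).map (fun v => ((9:Int), v)) ++
  (PySem.List.pyRange 20 24 1).map (fun v => ((12:Int), v)) ++
  (PySem.List.pyRange 20 24 1).map (fun v => ((15:Int), v)) ++
  (PySem.List.pyRange 23 26 1).map (fun v => ((18:Int), v)) ++
  (PySem.List.pyRange 26 30 1).map (fun v => ((15:Int), v)) ++
  (PySem.List.pyRange 23 27 1).map (fun v => ((24:Int), v))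

-- deduplicating before or after mapping gives the same set-list
theorem pv_ofList_map_ofList {α β : Type} [BEq α] [LawfulBEq α] [BEq β] [LawfulBEq β]
    (f : α → β) (l : List α) :
    PySem.Set.ofList (l.map f) = PySem.Set.ofList ((PySem.Set.ofList l).map f) := by
  induction l using List.reverseRecOn with
  | nil => rfl
  | append_singleton xs x ih =>
    rw [List.map_append, List.map_singleton, PySem.Set.ofList_append_singleton,
        PySem.Set.ofList_append_singleton, ih]
    by_cases hx : x ∈ PySem.Set.ofList xs
    · have hx' : x ∈ xs := by have h2 := hx; simp only [PySem.Set.mem_ofList] at h2; exact h2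
      rw [PySem.Set.add_of_mem hx, PySem.Set.add_of_mem]
      simp only [PySem.Set.mem_ofList, List.mem_map]
      exact ⟨x, hx', rfl⟩
    · rw [PySem.Set.add_of_not_mem hx, List.map_append, List.map_singleton,
          PySem.Set.ofList_append_singleton]

set_option maxRecDepth 100000 in
theorem pvA_eq (blockSize topSpace : Int) :
    resetDots blockSize topSpace =
      PySem.Set.ofList (pvCellsSeq.map (fun c => (c.1*blockSize, c.2*blockSize+topSpace*blockSize))) := by
  unfold resetDots pvCellsSeq
  simp only [List.map_append, List.map_map, Function.comp_def, ← PySem.Set.update_nil_left,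
    PySem.Set.update_append, PySem.Set.update_map_eq_foldl_add]

set_option maxRecDepth 100000 in
theorem pv_cells_dedup : PySem.Set.ofList pvCellsSeq = pvDotCells := by decide

-- ===== VERDICT =====
theorem resetDots_spec : Claim_equal_resetDots := by
  intro blockSize topSpace _
  unfold Spec_resetDots resetDots_alt
  rw [pvA_eq, pv_ofList_map_ofList, pv_cells_dedup]
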